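-- pv_equiv track=rewrite | github.com/miapkz/cse160-projects | social-network/social_network.py | number_map_to_sorted_list
-- ===== SOURCE A (Python) =====
-- from operator import itemgetter
--
-- def number_map_to_sorted_list(map_with_number_vals):
--     """Given a dictionary, return a list of the keys in the dictionary.
--     The keys are sorted by the number value they map to, from greatest
--     number down to smallest number.
--     When two keys map to the same number value, the keys are sorted by their
--     natural sort order for whatever type the key is, from least to greatest.
--
--     Arguments:
--         map_with_number_vals: a dictionary whose values are numbers
--
--     Returns: a list of keys, sorted by the values in map_with_number_vals
--     """
--     # initialize final list and dict to tuple list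
--     s_list = []
--     dict_to_tuple = []
--     # turn the input dictionary into a list of tuples
--     for key, val in map_with_number_vals.items():
--         t = tuple([key, val])
--         dict_to_tuple.append(t)
--     # sort alphabetically
--     alpha_sort = sorted(dict_to_tuple, key=itemgetter(0))
--     # sort by number value
--     sorted_list = sorted(alpha_sort, key=itemgetter(1), reverse=True)
--     # return corresponding keys in a list
--     for i in sorted_list:
--         s_list.append(i[0])
--     return s_list
-- ===== SOURCE B (Python) =====
-- def number_map_to_sorted_list(map_with_number_vals):
--     # group keys by their value, then emit values in descending order,
--     # each bucket's keys in ascending order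
--     buckets = {}
--     for key, val in map_with_number_vals.items():
--         buckets.setdefault(val, []).append(key)
--     result = []
--     for val in sorted(buckets, reverse=True):
--         result += sorted(buckets[val])
--     return result
-- ===== Notes on version B (the rewrite author's own statement) =====
-- stated objective: alternative
-- what changed: Replaces A's two stable sorts over (key, value) tuples by a group-by-value bucket dict built in one pass, then emits the distinct values in descending order with each bucket's keys sorted ascending.
import Mathlib
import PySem

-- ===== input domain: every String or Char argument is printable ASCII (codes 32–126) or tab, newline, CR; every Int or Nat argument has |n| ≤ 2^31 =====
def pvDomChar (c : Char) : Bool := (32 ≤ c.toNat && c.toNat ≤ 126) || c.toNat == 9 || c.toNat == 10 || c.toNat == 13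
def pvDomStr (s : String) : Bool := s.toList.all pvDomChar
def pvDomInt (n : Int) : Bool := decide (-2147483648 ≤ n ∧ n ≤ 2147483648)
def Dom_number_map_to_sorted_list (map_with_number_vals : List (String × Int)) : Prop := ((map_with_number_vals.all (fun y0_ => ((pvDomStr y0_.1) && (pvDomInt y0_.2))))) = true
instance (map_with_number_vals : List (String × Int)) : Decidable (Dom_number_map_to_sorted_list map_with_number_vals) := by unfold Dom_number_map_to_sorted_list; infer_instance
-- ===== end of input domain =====

-- B replaces A's two stable sorts over (key, value) tuples by a group-by-value
-- bucket dict: values emitted in descending order, each bucket's keys ascending.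

-- ===== PORT A =====
def number_map_to_sorted_list (map_with_number_vals : List (String × Int)) : List String :=
  let d := PySem.Dict.ofList map_with_number_vals
  -- for key, val in map_with_number_vals.items(): dict_to_tuple.append((key, val))
  let dict_to_tuple := d.items.foldl (fun acc p => acc ++ [(p.1, p.2)]) []
  -- alpha_sort = sorted(dict_to_tuple, key=itemgetter(0))
  let alpha_sort := PySem.List.sorted dict_to_tuple (fun t => t.1) false
  -- sorted_list = sorted(alpha_sort, key=itemgetter(1), reverse=True)
  let sorted_list := PySem.List.sorted alpha_sort (fun t => t.2) true
  -- for i in sorted_list: s_list.append(i[0])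
  sorted_list.foldl (fun acc t => acc ++ [t.1]) []

-- ===== PORT B =====
def number_map_to_sorted_list_alt (map_with_number_vals : List (String × Int)) : List String :=
  let d := PySem.Dict.ofList map_with_number_vals
  -- for key, val in d.items(): buckets.setdefault(val, []).append(key)
  let buckets := d.items.foldl (fun b p => b.modify p.2 [] (fun ks => ks ++ [p.1])) PySem.Dict.empty
  -- for val in sorted(buckets, reverse=True): result += sorted(buckets[val])
  let vals := PySem.List.sorted buckets.keys (fun v => v) true
  vals.foldl (fun acc v => acc ++ PySem.List.sorted (buckets.getD v []) (fun k => k) false) []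

-- ===== PRECONDITION & SPEC =====
def Spec_number_map_to_sorted_list (map_with_number_vals : List (String × Int)) (out : List String) : Prop := out = number_map_to_sorted_list_alt map_with_number_vals
instance (map_with_number_vals : List (String × Int)) (out : List String) : Decidable (Spec_number_map_to_sorted_list map_with_number_vals out) := by unfold Spec_number_map_to_sorted_list; infer_instance

-- ===== CLAIM (what is proved, stated in full; the proofs are below) =====
def Claim_equal_number_map_to_sorted_list : Prop := ∀ (map_with_number_vals : List (String × Int)), Dom_number_map_to_sorted_list map_with_number_vals → Spec_number_map_to_sorted_list map_with_number_vals (number_map_to_sorted_list map_with_number_vals)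

-- ===== LEMMAS AND PROOFS =====

-- The strict order both outputs are sorted by: value descending, key ascending.
def pvR (a b : String × Int) : Prop := b.2 < a.2 ∨ (a.2 = b.2 ∧ a.1 < b.1)

lemma pvR_trans {a b c : String × Int} (h1 : pvR a b) (h2 : pvR b c) : pvR a c := by
  rcases h1 with h1 | ⟨h1, h1'⟩ <;> rcases h2 with h2 | ⟨h2, h2'⟩
  · exact Or.inl (lt_trans h2 h1)
  · exact Or.inl (h2 ▸ h1)
  · exact Or.inl (h1 ▸ h2)
  · exact Or.inr ⟨h1.trans h2, lt_trans h1' h2'⟩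

lemma pvR_antisymm {a b : String × Int} (h1 : pvR a b) (h2 : pvR b a) : a = b := by
  exfalso
  rcases h1 with h1 | ⟨h1, h1'⟩ <;> rcases h2 with h2 | ⟨h2, h2'⟩
  · exact absurd h2 (lt_asymm h1)
  · exact absurd h1 (h2 ▸ lt_irrefl _)
  · exact absurd h2 (h1 ▸ lt_irrefl _)
  · exact absurd h2' (lt_asymm h1')

-- Inserting x into a pvR-sorted list keeps it pvR-sorted, provided the
-- stability predicate agrees with pvR against every element of the list.
lemma pairwise_insertBy (before : (String × Int) → (String × Int) → Bool) (x : String × Int) :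
    ∀ (ys : List (String × Int)), ys.Pairwise pvR →
    (∀ y ∈ ys, if before x y then pvR x y else pvR y x) →
    (PySem.List.insertBy before x ys).Pairwise pvR := by
  intro ys
  induction ys with
  | nil => intro _ _; simp [PySem.List.insertBy]
  | cons y t ih =>
    intro hp h
    rw [PySem.List.insertBy]
    rcases List.pairwise_cons.mp hp with ⟨hyt, hpt⟩
    by_cases hb : before x y = true
    · rw [if_pos hb]
      have hxy : pvR x y := by have := h y (by simp); simpa [hb] using this
      refine List.pairwise_cons.mpr ⟨?_, hp⟩
      intro z hz
      rcases List.mem_cons.mp hz with rfl | hz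
      · exact hxy
      · exact pvR_trans hxy (hyt z hz)
    · rw [if_neg hb]
      refine List.pairwise_cons.mpr ⟨?_, ih hpt (fun z hz => h z (by simp [hz]))⟩
      intro z hz
      rcases (PySem.List.insertBy_mem_iff before x z t).mp hz with rfl | hz
      · have := h y (by simp); simpa [hb] using this
      · exact hyt z hz

-- A's second (reverse, stable) sort of a key-strictly-ascending list is pvR-sorted.
lemma foldl_insertBy_pairwise :
    ∀ (ps acc : List (String × Int)), acc.Pairwise pvR →
    (∀ y ∈ acc, ∀ x ∈ ps, y.1 < x.1) → ps.Pairwise (fun a b => a.1 < b.1) →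
    (ps.foldl (fun acc x => PySem.List.insertBy (fun a b => decide (b.2 < a.2)) x acc) acc).Pairwise pvR := by
  intro ps
  induction ps with
  | nil => intro acc h _ _; simpa using h
  | cons x t ih =>
    intro acc hacc hcross hps
    rcases List.pairwise_cons.mp hps with ⟨hxt, hpt⟩
    simp only [List.foldl_cons]
    apply ih
    · apply pairwise_insertBy _ _ _ hacc
      intro y hy
      by_cases hb : (decide (y.2 < x.2) : Bool) = true
      · rw [if_pos hb]
        exact Or.inl (of_decide_eq_true hb)
      · rw [if_neg hb]
        have hle : x.2 ≤ y.2 := le_of_not_gt (by simpa using hb)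
        rcases lt_or_eq_of_le hle with hlt | heq
        · exact Or.inl hlt
        · exact Or.inr ⟨heq.symm, hcross y hy x (by simp)⟩
    · intro y hy z hz
      rcases (PySem.List.insertBy_mem_iff _ x y acc).mp hy with rfl | hy
      · exact hxt z hz
      · exact hcross y hy z (by simp [hz])
    · exact hpt

lemma sorted_rev_snd_pairwise (ps : List (String × Int))
    (hps : ps.Pairwise (fun a b => a.1 < b.1)) :
    (PySem.List.sorted ps (fun t => t.2) true).Pairwise pvR := by
  rw [PySem.List.sorted_rev_eq_foldl_insertBy]
  exact foldl_insertBy_pairwise ps [] (by simp) (by simp) hps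

-- A's first sort is strictly ascending on keys (dict keys are distinct).
lemma alpha_sort_pairwise (items : List (String × Int)) (hnd : (items.map (·.1)).Nodup) :
    (PySem.List.sorted items (fun t => t.1) false).Pairwise (fun a b => a.1 < b.1) := by
  have hle := PySem.List.sorted_pairwise items (fun t => t.1)
  have hperm : ((PySem.List.sorted items (fun t => t.1) false).map (·.1)).Perm (items.map (·.1)) :=
    (PySem.List.sorted_perm items (fun t => t.1) false).map _
  have hnd' : ((PySem.List.sorted items (fun t => t.1) false).map (·.1)).Nodup :=
    hperm.nodup_iff.mpr hnd
  have hne : (PySem.List.sorted items (fun t => t.1) false).Pairwise (fun a b => a.1 ≠ b.1) :=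
    List.pairwise_map.mp hnd'
  exact (hle.and hne).imp (fun h => lt_of_le_of_ne h.1 h.2)

-- Emitting buckets of a value-partition in descending value order is pvR-sorted.
lemma flatMap_buckets_pairwise (vals : List Int) (bucket : Int → List String)
    (hvals : vals.Pairwise (fun a b => b < a))
    (hbk : ∀ v ∈ vals, (bucket v).Pairwise (· < ·)) :
    (vals.flatMap (fun v => (bucket v).map (fun k => (k, v)))).Pairwise pvR := by
  rw [List.pairwise_flatMap]
  constructor
  · intro v hv
    rw [List.pairwise_map]
    exact (hbk v hv).imp (fun h => Or.inr ⟨rfl, h⟩)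
  · refine hvals.imp ?_
    intro v w hvw x hx y hy
    simp only [List.mem_map] at hx hy
    rcases hx with ⟨kx, _, rfl⟩
    rcases hy with ⟨ky, _, rfl⟩
    exact Or.inl hvw

-- A partition of items by their (distinct, exhaustive) values is a permutation.
lemma flatMap_filter_perm (vals : List Int) :
    ∀ (items : List (String × Int)), vals.Nodup → (∀ p ∈ items, p.2 ∈ vals) →
    (vals.flatMap (fun v => items.filter (fun p => p.2 == v))).Perm items := by
  induction vals with
  | nil =>
    intro items _ h
    have : items = [] := List.eq_nil_iff_forall_not_mem.mpr
      (fun p hp => absurd (h p hp) (List.not_mem_nil))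
    simp [this]
  | cons v t ih =>
    intro items hnd hmem
    rcases List.nodup_cons.mp hnd with ⟨hvt, hndt⟩
    simp only [List.flatMap_cons]
    have hrest : (t.flatMap (fun w => items.filter (fun p => p.2 == w))) =
        (t.flatMap (fun w => (items.filter (fun p => !(p.2 == v))).filter (fun p => p.2 == w))) := by
      apply List.flatMap_congr
      intro w hw
      rw [List.filter_filter]
      apply List.filter_congr
      intro p _
      by_cases h : p.2 = w
      · have hwv : ¬ (w = v) := fun hh => hvt (hh ▸ hw)
        simp [h, hwv]
      · simp [h]
    rw [hrest]
    have ihp := ih (items.filter (fun p => !(p.2 == v))) hndt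
      (by
        intro p hp
        rcases List.mem_filter.mp hp with ⟨hpi, hpv⟩
        rcases List.mem_cons.mp (hmem p hpi) with h | h
        · simp [h] at hpv
        · exact h)
    exact (List.Perm.append_left _ ihp).trans (List.filter_append_perm _ items)

-- ----- characterizing the two ports -----

lemma a_eq (m : List (String × Int)) :
    number_map_to_sorted_list m =
      (PySem.List.sorted
        (PySem.List.sorted (PySem.Dict.ofList m).items (fun t => t.1) false)
        (fun t => t.2) true).map (fun t => t.1) := by
  unfold number_map_to_sorted_list
  simp only [Prod.mk.eta, PySem.List.foldl_append_singleton, List.nil_append,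
    PySem.List.foldl_append_singleton_eq_map]

def pvBucket (items : List (String × Int)) (v : Int) : List String :=
  (items.filter (fun p => p.2 == v)).map (fun p => p.1)

def pvVals (items : List (String × Int)) : List Int :=
  PySem.List.sorted (PySem.Set.ofList (items.map (fun p => p.2))) (fun v => v) true

lemma b_eq (m : List (String × Int)) :
    number_map_to_sorted_list_alt m =
      (pvVals (PySem.Dict.ofList m).items).flatMap
        (fun v => PySem.List.sorted (pvBucket (PySem.Dict.ofList m).items v) (fun k => k) false) := by
  unfold number_map_to_sorted_list_alt
  dsimp only
  have hfold : ∀ (items : List (String × Int)),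
      items.foldl (fun b p => b.modify p.2 [] (fun ks => ks ++ [p.1])) PySem.Dict.empty =
      (items.map (fun p => (p.2, p.1))).foldl
        (fun b q => b.modify q.1 [] (fun ks => ks ++ [q.2])) PySem.Dict.empty := by
    intro items; rw [List.foldl_map]
  set items := (PySem.Dict.ofList m).items with hitems
  rw [hfold]
  have hgetD : ∀ v : Int,
      ((items.map (fun p => (p.2, p.1))).foldl
        (fun b q => b.modify q.1 [] (fun ks => ks ++ [q.2])) PySem.Dict.empty).getD v [] =
      pvBucket items v := by
    intro v
    rw [PySem.Dict.getD_foldl_modify_append]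
    simp [pvBucket, List.filter_map, List.map_map, Function.comp_def]
  have hkeys :
      ((items.map (fun p => (p.2, p.1))).foldl
        (fun b q => b.modify q.1 [] (fun ks => ks ++ [q.2])) PySem.Dict.empty).keys =
      PySem.Set.ofList (items.map (fun p => p.2)) := by
    rw [← hfold]
    rw [PySem.Dict.keys_foldl_modify_key items (fun p => p.2) [] (fun _ p => fun ks => ks ++ [p.1])]
    simp [PySem.Set.update_nil_left]
  rw [hkeys]
  rw [PySem.List.foldl_append_eq_flatMap, List.nil_append]
  apply List.flatMap_congr
  intro v _
  rw [hgetD]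

theorem number_map_to_sorted_list_spec : Claim_equal_number_map_to_sorted_list := by
  intro m _
  unfold Spec_number_map_to_sorted_list
  set items := (PySem.Dict.ofList m).items with hitems
  have hnd : (items.map (fun p => p.1)).Nodup := PySem.Dict.nodup_keys_ofList m
  -- A's pair list
  set aps := PySem.List.sorted (PySem.List.sorted items (fun t => t.1) false) (fun t => t.2) true with haps
  have haperm : aps.Perm items :=
    (PySem.List.sorted_perm _ _ true).trans (PySem.List.sorted_perm _ _ false)
  have hapw : aps.Pairwise pvR :=
    sorted_rev_snd_pairwise _ (alpha_sort_pairwise items hnd)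
  -- B's pair list
  set qs := (pvVals items).flatMap
    (fun v => (PySem.List.sorted (pvBucket items v) (fun k => k) false).map (fun k => (k, v))) with hqs
  -- properties of vals
  have hvperm : (pvVals items).Perm (PySem.Set.ofList (items.map (fun p => p.2))) :=
    PySem.List.sorted_perm _ _ true
  have hvnd : (pvVals items).Nodup := hvperm.nodup_iff.mpr (PySem.Set.nodup_ofList _)
  have hvmem : ∀ p ∈ items, p.2 ∈ pvVals items := by
    intro p hp
    rw [hvperm.mem_iff, PySem.Set.mem_ofList]
    exact List.mem_map_of_mem hp
  have hvpw : (pvVals items).Pairwise (fun a b => b < a) := by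
    have hle := PySem.List.sorted_pairwise_rev (PySem.Set.ofList (items.map (fun p => p.2))) (fun v => v)
    have hne : (pvVals items).Pairwise (fun a b => a ≠ b) := hvnd
    exact (hle.and hne).imp (fun h => lt_of_le_of_ne h.1 h.2.symm)
  -- bucket keys are distinct
  have hbknd : ∀ v : Int, (pvBucket items v).Nodup := by
    intro v
    have : (pvBucket items v).Sublist (items.map (fun p => p.1)) :=
      (List.filter_sublist).map _
    exact this.nodup hnd
  -- qs is pvR-sorted
  have hqpw : qs.Pairwise pvR := by
    apply flatMap_buckets_pairwise
    · exact hvpw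
    · intro v _
      have hle := PySem.List.sorted_pairwise (pvBucket items v) (fun k => k)
      have hperm := PySem.List.sorted_perm (pvBucket items v) (fun k => k) false
      have hne : (PySem.List.sorted (pvBucket items v) (fun k => k) false).Pairwise (fun a b => a ≠ b) :=
        hperm.nodup_iff.mpr (hbknd v)
      exact (hle.and hne).imp (fun h => lt_of_le_of_ne h.1 h.2)
  -- qs is a permutation of items
  have hqperm : qs.Perm items := by
    have hstep : qs.Perm ((pvVals items).flatMap (fun v => items.filter (fun p => p.2 == v))) := by
      apply List.Perm.flatMap_left
      intro v _
      have h1 : ((PySem.List.sorted (pvBucket items v) (fun k => k) false).map (fun k => (k, v))).Perm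
          ((pvBucket items v).map (fun k => (k, v))) :=
        (PySem.List.sorted_perm _ _ false).map _
      have h2 : (pvBucket items v).map (fun k => (k, v)) = items.filter (fun p => p.2 == v) := by
        rw [pvBucket, List.map_map]
        have : ∀ p ∈ items.filter (fun p => p.2 == v),
            ((fun k => (k, v)) ∘ (fun p : String × Int => p.1)) p = p := by
          intro p hp
          have hv : p.2 = v := by simpa using (List.mem_filter.mp hp).2
          simp [Function.comp, ← hv]
        rw [List.map_congr_left this]
        simp
      rw [h2] at h1
      exact h1
    exact hstep.trans (flatMap_filter_perm (pvVals items) items hvnd hvmem)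
  -- the two sorted pair lists are equal
  have hpair : aps = qs := by
    apply List.Perm.eq_of_pairwise (fun a b _ _ h1 h2 => pvR_antisymm h1 h2) hapw hqpw
    exact haperm.trans hqperm.symm
  rw [a_eq, b_eq, ← hitems, ← haps, hpair, hqs]
  rw [List.map_flatMap]
  apply List.flatMap_congr
  intro v _
  simp [Function.comp_def]
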